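-- pv_equiv track=rewrite | github.com/ssunbear/Algorithm | 프로그래머스/3/133500. 등대/등대.py | solution
-- ===== SOURCE A (Python) =====
-- def dfs(graph, node, visited, LH):
--     lighthouse_status = []
--     visited[node] = True
--     need_turn_on = False
--
--     for next_node in graph[node]:
--         if not visited[next_node]:
--             lighthouse_status.append(dfs(graph, next_node, visited, LH))
--
--     if 1 <= lighthouse_status.count(False):
--         LH[node] = True
--         return True
--
--     return need_turn_on
--
-- def solution(n, lighthouse):
--     answer = 0
--     LH = [False] * (n + 1)
--     visited = [False] * (n + 1)
--     graph = [[] * n for _ in range(n + 1)]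
--
--     for start, end in lighthouse:
--         graph[start].append(end)
--         graph[end].append(start)
--
--     dfs(graph, lighthouse[0][0], visited, LH)
--
--     count_true = LH.count(True)
--     return count_true
-- ===== SOURCE B (Python) =====
-- def solution(n, lighthouse):
--     graph = [[] for _ in range(n + 1)]
--     for start, end in lighthouse:
--         graph[start].append(end)
--         graph[end].append(start)
--     visited = [False] * (n + 1)
--     order = []
--     stack = [(lighthouse[0][0], None)]
--     while stack:
--         node, par = stack.pop()
--         if visited[node]:
--             continue
--         visited[node] = True
--         order.append((node, par))
--         for nxt in reversed(graph[node]):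
--             if not visited[nxt]:
--                 stack.append((nxt, node))
--     on = [False] * (n + 1)
--     for node, par in reversed(order):
--         if par is not None and not on[node]:
--             on[par] = True
--     return on.count(True)
-- ===== Notes on version B (the rewrite author's own statement) =====
-- stated objective: alternative
-- what changed: Replaces the recursive post-order DFS (per-node status list + global LH array mutated during recursion) by an explicit-stack traversal that only records visitation order and parent pointers, followed by a reverse sweep over that order that lights a parent whenever a node is unlit; the count is taken from the sweep's array.
import Mathlib
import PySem

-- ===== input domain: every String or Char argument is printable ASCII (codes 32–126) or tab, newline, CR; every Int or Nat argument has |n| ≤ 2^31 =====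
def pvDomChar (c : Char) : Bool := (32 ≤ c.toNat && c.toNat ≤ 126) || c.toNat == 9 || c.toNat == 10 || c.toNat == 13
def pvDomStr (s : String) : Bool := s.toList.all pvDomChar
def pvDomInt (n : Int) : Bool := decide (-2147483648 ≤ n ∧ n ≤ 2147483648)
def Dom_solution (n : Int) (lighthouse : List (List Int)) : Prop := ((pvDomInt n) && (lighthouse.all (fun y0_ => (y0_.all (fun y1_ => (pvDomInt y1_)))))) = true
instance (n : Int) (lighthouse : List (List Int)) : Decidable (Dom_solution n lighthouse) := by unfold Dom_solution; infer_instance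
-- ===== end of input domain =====

-- B replaces A's recursive post-order DFS by an explicit-stack traversal recording order+parents
-- plus a reverse sweep (alternative decomposition, same asymptotic cost; return value only —
-- neither side's argument mutation is observable through the return).


-- ===== PORT A =====
-- dfs(graph, node, visited, LH): returns (return value, visited, LH).  The Nat argument is a
-- fuel bound making the recursion structural; with the fuel solution passes it is never exhausted
-- on inputs satisfying Pre_ (proved below).
mutual
def dfsA (fuel : Nat) (g : List (List Int)) (node : Int) (vis LH : List Bool) :
    Bool × List Bool × List Bool :=
  match fuel with
  | 0 => (false, vis, LH)
  | f + 1 =>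
    let vis1 := PySem.List.pySetD vis node true
    let t := dfsALoop f g (PySem.List.pyGetD g node []) vis1 LH
    if 1 ≤ t.1.count false then (true, t.2.1, PySem.List.pySetD t.2.2 node true)
    else (false, t.2.1, t.2.2)
  termination_by (fuel, 0)
-- the 'for next_node in graph[node]' loop, accumulating lighthouse_status in order
def dfsALoop (fuel : Nat) (g : List (List Int)) (nexts : List Int) (vis LH : List Bool) :
    List Bool × List Bool × List Bool :=
  match nexts with
  | [] => ([], vis, LH)
  | nx :: rest =>
    if PySem.List.pyGetD vis nx false = false then
      let c := dfsA fuel g nx vis LH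
      let t := dfsALoop fuel g rest c.2.1 c.2.2
      (c.1 :: t.1, t.2.1, t.2.2)
    else dfsALoop fuel g rest vis LH
  termination_by (fuel, nexts.length + 1)
end

def solution (n : Int) (lighthouse : List (List Int)) : Int :=
  let LH := List.replicate (n + 1).toNat false
  let visited := List.replicate (n + 1).toNat false
  let graph0 := (PySem.List.pyRange 0 (n + 1) 1).map (fun _ => ([] : List Int))
  let graph := lighthouse.foldl (fun g p =>
    match p with
    | s :: e :: _ =>
      let g1 := PySem.List.pySetD g s (PySem.List.pyGetD g s [] ++ [e])
      PySem.List.pySetD g1 e (PySem.List.pyGetD g1 e [] ++ [s])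
    | _ => g) graph0
  let res := dfsA ((n + 1).toNat + 1) graph
    (PySem.List.pyGetD (PySem.List.pyGetD lighthouse 0 []) 0 0) visited LH
  ((res.2.2).count true : Int)

-- ===== PORT B =====
-- the while-loop over the explicit stack (top = list head); fuel = 2*len(lighthouse)+1 pops,
-- enough on inputs satisfying Pre_ (proved below)
def dfsB (fuel : Nat) (g : List (List Int)) (stack : List (Int × Option Int))
    (vis : List Bool) (order : List (Int × Option Int)) :
    List Bool × List (Int × Option Int) :=
  match fuel, stack with
  | 0, _ => (vis, order)
  | _ + 1, [] => (vis, order)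
  | f + 1, (node, par) :: rest =>
      if PySem.List.pyGetD vis node false then dfsB f g rest vis order
      else
        let vis1 := PySem.List.pySetD vis node true
        let order1 := order ++ [(node, par)]
        let stack1 := (PySem.List.pyGetD g node []).reverse.foldl
          (fun st nxt => if PySem.List.pyGetD vis1 nxt false = false then (nxt, some node) :: st else st)
          rest
        dfsB f g stack1 vis1 order1

-- the 'for node, par in reversed(order)' sweep
def sweepB (order : List (Int × Option Int)) (on0 : List Bool) : List Bool :=
  order.reverse.foldl (fun onAcc np =>
    match np.2 with
    | none => onAcc
    | some q => if PySem.List.pyGetD onAcc np.1 false then onAcc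
                else PySem.List.pySetD onAcc q true) on0

def solution_alt (n : Int) (lighthouse : List (List Int)) : Int :=
  let graph0 := (PySem.List.pyRange 0 (n + 1) 1).map (fun _ => ([] : List Int))
  let graph := lighthouse.foldl (fun g p =>
    match p with
    | [] => g
    | _ :: [] => g
    | s :: e :: _ =>
      let g1 := PySem.List.pySetD g s (PySem.List.pyGetD g s [] ++ [e])
      PySem.List.pySetD g1 e (PySem.List.pyGetD g1 e [] ++ [s])) graph0
  let visited := List.replicate (n + 1).toNat false
  let root := PySem.List.pyGetD (PySem.List.pyGetD lighthouse 0 []) 0 0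
  let res := dfsB (2 * lighthouse.length + 1) graph [(root, none)] visited []
  let onArr := sweepB res.2 (List.replicate (n + 1).toNat false)
  (onArr.count true : Int)

-- ===== PRECONDITION & SPEC =====
-- Pre_ excludes exactly the inputs on which A raises: negative n (graph is empty, graph[start]
-- raises IndexError), empty lighthouse (lighthouse[0][0] raises IndexError), an edge that is not
-- a 2-element list (ValueError on unpacking), and an endpoint outside the valid index range
-- -(n+1) .. n of the length-(n+1) arrays (IndexError).
def Pre_solution (n : Int) (lighthouse : List (List Int)) : Prop :=
  0 ≤ n ∧ lighthouse ≠ [] ∧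
    ∀ p ∈ lighthouse, p.length = 2 ∧ ∀ e ∈ p, -(n + 1) ≤ e ∧ e ≤ n
instance (n : Int) (lighthouse : List (List Int)) : Decidable (Pre_solution n lighthouse) := by
  unfold Pre_solution; infer_instance

def pvWitness_solution : Int × List (List Int) := (2, [[0, 1], [1, 2]])

def Spec_solution (n : Int) (lighthouse : List (List Int)) (out : Int) : Prop :=
  out = solution_alt n lighthouse
instance (n : Int) (lighthouse : List (List Int)) (out : Int) : Decidable (Spec_solution n lighthouse out) := by
  unfold Spec_solution; infer_instance

-- ===== CLAIM (what is proved, stated in full; the proofs are below) =====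
def Claim_equal_solution : Prop := ∀ (n : Int) (lighthouse : List (List Int)),
  Dom_solution n lighthouse → Pre_solution n lighthouse →
    Spec_solution n lighthouse (solution n lighthouse)

-- ===== LEMMAS AND PROOFS =====

-- valid Python index for a length-m list
def InR (m : Nat) (i : Int) : Prop := -(m : Int) ≤ i ∧ i < (m : Int)
-- the slot (non-negative position) a Python index i denotes in a length-m list
def sl (m : Nat) (i : Int) : Nat := (if i < 0 then i + m else i).toNat
-- total read of a Bool array
def gv (xs : List Bool) (j : Nat) : Bool := xs.getD j false
def AllInR (m : Nat) (g : List (List Int)) : Prop := ∀ row ∈ g, ∀ e ∈ row, InR m e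
-- total adjacency mass of the not-yet-visited slots (fuel potential for dfsB)
def ds (g : List (List Int)) (vis : List Bool) : Nat :=
  ∑ j ∈ Finset.range g.length, (if gv vis j then 0 else (g.getD j []).length)

lemma sl_lt {m : Nat} {i : Int} (h : InR m i) : sl m i < m := by
  rcases h with ⟨h1, h2⟩; unfold sl; split <;> omega

lemma getD_set {α : Type} (xs : List α) (k : Nat) (v : α) (j : Nat) (d : α) :
    (xs.set k v).getD j d = if j = k ∧ k < xs.length then v else xs.getD j d := by
  simp only [List.getD_eq_getElem?_getD, List.getElem?_set]
  split_ifs with h1 h2 h3 h4 <;> simp_all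

lemma pyIdx_sl {n : Nat} {i : Int} (h : InR n i) :
    PySem.List.pyIdx? n i = some (sl n i) := by
  obtain ⟨h1, h2⟩ := h
  simp only [PySem.List.pyIdx?, sl]
  by_cases hi : 0 ≤ i
  · rw [if_pos hi, if_pos h2, if_neg (by omega)]
  · rw [if_neg hi, if_pos h1, if_pos (by omega)]
    congr 1; omega

lemma pyGetD_getD {α : Type} (xs : List α) (i : Int) (d : α) (h : InR xs.length i) :
    PySem.List.pyGetD xs i d = xs.getD (sl xs.length i) d := by
  simp only [PySem.List.pyGetD, PySem.List.pyGet?, pyIdx_sl h]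
  rfl

lemma pyGetD_gv (xs : List Bool) (i : Int) (h : InR xs.length i) :
    PySem.List.pyGetD xs i false = gv xs (sl xs.length i) := pyGetD_getD xs i false h

lemma pySetD_set {α : Type} (xs : List α) (i : Int) (v : α) (h : InR xs.length i) :
    PySem.List.pySetD xs i v = xs.set (sl xs.length i) v := by
  simp only [PySem.List.pySetD, PySem.List.pySet?, pyIdx_sl h, Option.map_some,
    Option.getD_some]

lemma count_false_set (xs : List Bool) (k : Nat) (hk : k < xs.length)
    (hv : gv xs k = false) : (xs.set k true).count false + 1 = xs.count false := by
  induction xs generalizing k with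
  | nil => simp at hk
  | cons a t ih =>
    cases k with
    | zero =>
      simp only [gv, List.getD_eq_getElem?_getD] at hv
      simp at hv
      subst hv
      simp
    | succ k =>
      simp only [List.set_cons_succ, List.count_cons]
      have := ih k (by simpa using hk) (by simpa [gv] using hv)
      omega

lemma eq_of_gv (a b : List Bool) (hl : a.length = b.length)
    (h : ∀ j, gv a j = gv b j) : a = b := by
  apply List.ext_getElem hl
  intro i h1 h2
  have := h i
  simpa [gv, List.getD_eq_getElem?_getD, List.getElem?_eq_getElem, h1, h2] using this

lemma sweepB_nil (on0 : List Bool) : sweepB [] on0 = on0 := rfl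

lemma sweepB_append (l1 l2 : List (Int × Option Int)) (on0 : List Bool) :
    sweepB (l1 ++ l2) on0 = sweepB l1 (sweepB l2 on0) := by
  simp [sweepB, List.reverse_append, List.foldl_append]

lemma sweepB_cons (a : Int × Option Int) (l : List (Int × Option Int)) (on0 : List Bool) :
    sweepB (a :: l) on0 =
      (match a.2 with
       | none => sweepB l on0
       | some q => if PySem.List.pyGetD (sweepB l on0) a.1 false then sweepB l on0
                   else PySem.List.pySetD (sweepB l on0) q true) := by
  obtain ⟨a1, a2⟩ := a
  cases a2 <;> simp [sweepB, List.foldl_append]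

lemma dfsB_nil (k : Nat) (g : List (List Int)) (vis : List Bool)
    (acc : List (Int × Option Int)) : dfsB k g [] vis acc = (vis, acc) := by
  cases k <;> rfl

lemma push_foldl (l : List Int) (rest : List (Int × Option Int)) (v : Int)
    (vis1 : List Bool) :
    l.reverse.foldl
      (fun st nxt => if PySem.List.pyGetD vis1 nxt false = false then (nxt, some v) :: st else st)
      rest
    = (l.filter (fun nx => !(PySem.List.pyGetD vis1 nx false))).map
        (fun nx => (nx, (some v : Option Int))) ++ rest := by
  rw [List.foldl_reverse]
  induction l with
  | nil => rfl
  | cons a t ih =>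
    simp only [List.foldr_cons, ih, List.filter_cons]
    by_cases hp : PySem.List.pyGetD vis1 a false = false
    · rw [if_pos hp]; simp [hp]
    · rw [if_neg hp]
      simp at hp
      simp [hp]

lemma ds_set (g : List (List Int)) (vis : List Bool) (k : Nat) (hk : k < g.length)
    (hv : gv vis k = false) (hkl : k < vis.length) :
    ds g (vis.set k true) + (g.getD k []).length = ds g vis := by
  unfold ds
  rw [← Finset.sum_erase_add _ _ (Finset.mem_range.2 hk),
      ← Finset.sum_erase_add _ _ (Finset.mem_range.2 hk)]
  have he : ∀ j ∈ (Finset.range g.length).erase k,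
      (if gv (vis.set k true) j then 0 else (g.getD j []).length)
        = (if gv vis j then 0 else (g.getD j []).length) := by
    intro j hj
    have hjk : j ≠ k := (Finset.mem_erase.1 hj).1
    rw [gv, getD_set, if_neg (show ¬(j = k ∧ k < vis.length) from fun hc => hjk hc.1)]
    rfl
  rw [Finset.sum_congr rfl he]
  have h1 : gv (vis.set k true) k = true := by
    rw [gv, getD_set, if_pos ⟨rfl, hkl⟩]
  rw [h1, hv]
  simp

-- proof-side recursive DFS that records the (node, parent) visitation order
mutual
def dfsC (fuel : Nat) (g : List (List Int)) (node : Int) (par : Option Int)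
    (vis : List Bool) : List Bool × List (Int × Option Int) :=
  match fuel with
  | 0 => (vis, [(node, par)])
  | f + 1 =>
    let vis1 := PySem.List.pySetD vis node true
    let t := dfsCLoop f g node (PySem.List.pyGetD g node []) vis1
    (t.1, (node, par) :: t.2)
  termination_by (fuel, 0)
def dfsCLoop (fuel : Nat) (g : List (List Int)) (parent : Int) (nexts : List Int)
    (vis : List Bool) : List Bool × List (Int × Option Int) :=
  match nexts with
  | [] => (vis, [])
  | nx :: rest =>
    if PySem.List.pyGetD vis nx false = false then
      let c := dfsC fuel g nx (some parent) vis
      let t := dfsCLoop fuel g parent rest c.1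
      (t.1, c.2 ++ t.2)
    else dfsCLoop fuel g parent rest vis
  termination_by (fuel, nexts.length + 1)
end

-- the joint characterisation of one dfs call (A-side, C-order side, sweep, machine)
def NodeP (f : Nat) : Prop := ∀ (g : List (List Int)) (m : Nat) (x : Int) (vis : List Bool),
  g.length = m → vis.length = m → AllInR m g → InR m x → gv vis (sl m x) = false →
  vis.count false ≤ f →
  ∃ (r : Bool) (visA : List Bool) (P V : Nat → Bool) (sub : List (Int × Option Int)) (cost : Nat),
    visA.length = m ∧
    (∀ j, gv visA j = (gv vis j || V j)) ∧
    V (sl m x) = true ∧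
    (∀ j, V j = true → gv vis j = false ∧ j < m) ∧
    (∀ j, P j = true → V j = true) ∧
    P (sl m x) = r ∧
    visA.count false ≤ vis.count false ∧
    (∀ LH : List Bool, LH.length = m →
      ∃ LHA, dfsA f g x vis LH = (r, visA, LHA) ∧ LHA.length = m ∧
        (∀ j, gv LHA j = (gv LH j || P j))) ∧
    (∀ p : Option Int, dfsC f g x p vis = (visA, (x, p) :: sub)) ∧
    (∀ on0 : List Bool, on0.length = m → (∀ j, V j = true → gv on0 j = false) →
        (sweepB sub on0).length = m ∧ ∀ j, gv (sweepB sub on0) j = (gv on0 j || P j)) ∧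
    (∀ (p : Option Int) (k : Nat) (rest acc : List (Int × Option Int)),
        dfsB (cost + k) g ((x, p) :: rest) vis acc
          = dfsB k g rest visA (acc ++ (x, p) :: sub)) ∧
    cost + ds g visA ≤ 1 + ds g vis

def LoopP (f : Nat) : Prop := ∀ (g : List (List Int)) (m : Nat) (x : Int)
    (nexts : List Int) (vis : List Bool),
  g.length = m → vis.length = m → AllInR m g → (∀ e ∈ nexts, InR m e) → InR m x →
  gv vis (sl m x) = true → vis.count false ≤ f →
  ∃ (st : List Bool) (visA : List Bool) (P V : Nat → Bool) (sub : List (Int × Option Int)),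
    visA.length = m ∧
    (∀ j, gv visA j = (gv vis j || V j)) ∧
    (∀ j, V j = true → gv vis j = false ∧ j < m) ∧
    (∀ j, P j = true → V j = true) ∧
    visA.count false ≤ vis.count false ∧
    (∀ LH : List Bool, LH.length = m →
      ∃ LHA, dfsALoop f g nexts vis LH = (st, visA, LHA) ∧ LHA.length = m ∧
        (∀ j, gv LHA j = (gv LH j || P j))) ∧
    (dfsCLoop f g x nexts vis = (visA, sub)) ∧
    (∀ on0 : List Bool, on0.length = m → (∀ j, V j = true → gv on0 j = false) →
        (sweepB sub on0).length = m ∧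
        ∀ j, gv (sweepB sub on0) j =
          ((gv on0 j || P j) || (decide (j = sl m x) && st.contains false)))

def MLoopP (f : Nat) : Prop := ∀ (g : List (List Int)) (m : Nat) (x : Int)
    (nexts : List Int) (vis visFilt : List Bool),
  g.length = m → vis.length = m → AllInR m g → (∀ e ∈ nexts, InR m e) → InR m x →
  visFilt.length = m → (∀ j, gv visFilt j = true → gv vis j = true) → gv vis (sl m x) = true →
  vis.count false ≤ f →
  ∃ cost : Nat,
    (∀ (k : Nat) (rest acc : List (Int × Option Int)),
      dfsB (cost + k) g
        (((nexts.filter (fun nx => !(PySem.List.pyGetD visFilt nx false))).map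
            (fun nx => (nx, (some x : Option Int)))) ++ rest) vis acc
      = dfsB k g rest (dfsCLoop f g x nexts vis).1 (acc ++ (dfsCLoop f g x nexts vis).2)) ∧
    cost + ds g (dfsCLoop f g x nexts vis).1 ≤ nexts.length + ds g vis

lemma loopP_of_nodeP (f : Nat) (hn : NodeP f) : LoopP f := by
  intro g m x nexts
  induction nexts with
  | nil =>
    intro vis hg hv hall hnx hxr hgvx hcount
    refine ⟨[], vis, (fun _ => false), (fun _ => false), [], hv, by simp, by simp, by simp,
      le_refl _, ?_, ?_, ?_⟩
    · intro LH hLH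
      exact ⟨LH, by simp [dfsALoop], hLH, by simp⟩
    · simp [dfsCLoop]
    · intro on0 h1 _
      exact ⟨by simpa [sweepB_nil] using h1, by simp [sweepB_nil]⟩
  | cons nx rest ih =>
    intro vis hg hv hall hnx hxr hgvx hcount
    have hInR_nx : InR m nx := hnx nx List.mem_cons_self
    have hslnx : sl vis.length nx = sl m nx := by rw [hv]
    by_cases hvisnx : PySem.List.pyGetD vis nx false = false
    · -- nx not yet visited: one recursive dfs call, then the rest of the loop
      have hgv_nx : gv vis (sl m nx) = false := by
        rw [← hslnx, ← pyGetD_gv vis nx (hv ▸ hInR_nx)]; exact hvisnx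
      obtain ⟨r, visA1, P1, V1, sub1, cost1, hA1len, hA1vis, hV1x, hV1, hP1, hP1x, hcnt1,
        hA1, hC1, hS1, hB1, hcost1⟩ := hn g m nx vis hg hv hall hInR_nx hgv_nx hcount
      have hmono1 : ∀ j, gv vis j = true → gv visA1 j = true := by
        intro j hj; rw [hA1vis j, hj]; rfl
      obtain ⟨st2, visA2, P2, V2, sub2, hA2len, hA2vis, hV2, hP2, hcnt2, hA2, hC2, hS2⟩ :=
        ih visA1 hg hA1len hall (fun e he => hnx e (List.mem_cons_of_mem _ he)) hxr
          (hmono1 _ hgvx) (le_trans hcnt1 hcount)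
      refine ⟨r :: st2, visA2, (fun j => P1 j || P2 j), (fun j => V1 j || V2 j),
        ((nx, some x) :: sub1) ++ sub2, hA2len, ?_, ?_, ?_, le_trans hcnt2 hcnt1, ?_, ?_, ?_⟩
      · intro j; rw [hA2vis j, hA1vis j]; simp only []; cases gv vis j <;> cases V1 j <;> cases V2 j <;> simp
      · intro j hj
        rcases Bool.or_eq_true_iff.1 hj with h | h
        · exact hV1 j h
        · have h2 := hV2 j h
          refine ⟨?_, h2.2⟩
          by_contra hc
          have : gv vis j = true := by
            cases hgvj : gv vis j
            · exact absurd hgvj hc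
            · rfl
          have := hmono1 j this
          rw [h2.1] at this
          cases this
      · intro j hj
        rcases Bool.or_eq_true_iff.1 hj with h | h
        · simp [hP1 j h]
        · simp [hP2 j h]
      · -- A-side loop
        intro LH hLH
        obtain ⟨LHA1, hEq1, hL1, hpt1⟩ := hA1 LH hLH
        obtain ⟨LHA2, hEq2, hL2, hpt2⟩ := hA2 LHA1 hL1
        refine ⟨LHA2, ?_, hL2, ?_⟩
        · rw [dfsALoop, if_pos hvisnx, hEq1]
          simp [hEq2]
        · intro j; rw [hpt2 j, hpt1 j]; simp only []; cases gv LH j <;> cases P1 j <;> cases P2 j <;> simp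
      · -- C-side loop
        rw [dfsCLoop, if_pos hvisnx, hC1 (some x)]
        simp [hC2]
      · -- sweep
        intro on0 hlen0 hfresh
        have hfresh2 : ∀ j, V2 j = true → gv on0 j = false := fun j hj => hfresh j (by simp [hj])
        obtain ⟨hslen2, hsp2⟩ := hS2 on0 hlen0 hfresh2
        have hfresh1 : ∀ j, V1 j = true → gv (sweepB sub2 on0) j = false := by
          intro j hj
          have hvisj : gv vis j = false := (hV1 j hj).1
          have hA1j : gv visA1 j = true := by rw [hA1vis j, hj]; simp
          have h0 : gv on0 j = false := hfresh j (by simp [hj])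
          have hp2 : P2 j = false := by
            by_contra hc
            have hp2t : P2 j = true := by
              cases h : P2 j
              · exact absurd h hc
              · rfl
            have := (hV2 j (hP2 j hp2t)).1
            rw [hA1j] at this
            cases this
          have hjx : j ≠ sl m x := by
            intro h; subst h; rw [hgvx] at hvisj; cases hvisj
          rw [hsp2 j, h0, hp2, decide_eq_false hjx]
          rfl
        obtain ⟨hslen1, hsp1⟩ := hS1 (sweepB sub2 on0) hslen2 hfresh1
        rw [sweepB_append, sweepB_cons]
        have hon3len : (sweepB sub1 (sweepB sub2 on0)).length = m := hslen1
        have hInRnx3 : InR (sweepB sub1 (sweepB sub2 on0)).length nx := hon3len ▸ hInR_nx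
        have hnxne : sl m nx ≠ sl m x := by
          intro h
          have := (hV1 (sl m nx) hV1x).1
          rw [h, hgvx] at this
          cases this
        have hp2nx : P2 (sl m nx) = false := by
          by_contra hc
          have hp2t : P2 (sl m nx) = true := by
            cases h : P2 (sl m nx)
            · exact absurd h hc
            · rfl
          have := (hV2 _ (hP2 _ hp2t)).1
          rw [hA1vis, hV1x, Bool.or_true] at this
          cases this
        have hval : PySem.List.pyGetD (sweepB sub1 (sweepB sub2 on0)) nx false = r := by
          rw [pyGetD_gv _ nx hInRnx3]
          have hsleq : sl (sweepB sub1 (sweepB sub2 on0)).length nx = sl m nx := by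
            rw [hon3len]
          rw [hsleq, hsp1, hsp2, hfresh (sl m nx) (by simp [hV1x]), hp2nx,
            decide_eq_false hnxne, hP1x]
          rfl
        simp only [hval]
        cases r
        · -- child needs a lighthouse at the parent: sweep sets on[x]
          rw [if_neg (by simp)]
          have hInRx3 : InR (sweepB sub1 (sweepB sub2 on0)).length x := hon3len ▸ hxr
          rw [pySetD_set _ x true hInRx3]
          have hslx : sl (sweepB sub1 (sweepB sub2 on0)).length x = sl m x := by rw [hon3len]
          rw [hslx]
          constructor
          · simpa using hon3len
          · intro j
            rw [gv, getD_set]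
            by_cases hj : j = sl m x
            · subst hj
              rw [if_pos ⟨rfl, by rw [hon3len]; exact sl_lt hxr⟩]
              simp
            · rw [if_neg (by tauto)]
              have := hsp1 j
              rw [gv] at this
              rw [this, hsp2 j]
              simp only [List.contains_cons, decide_eq_false hj]
              cases gv on0 j <;> cases P1 j <;> cases P2 j <;> simp
        · -- child lit itself: nothing to do at the parent
          rw [if_pos rfl]
          refine ⟨hslen1, ?_⟩
          intro j
          rw [hsp1 j, hsp2 j]
          simp only [List.contains_cons]
          cases gv on0 j <;> cases P1 j <;> cases P2 j <;> cases decide (j = sl m x) <;>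
            cases st2.contains false <;> simp
    · -- nx already visited: both loops skip it
      have hskip : PySem.List.pyGetD vis nx false = true := by
        cases h : PySem.List.pyGetD vis nx false
        · exact absurd h hvisnx
        · rfl
      obtain ⟨st2, visA2, P2, V2, sub2, h1, h2, h3, h4, h5, h6, h7, h8⟩ :=
        ih vis hg hv hall (fun e he => hnx e (List.mem_cons_of_mem _ he)) hxr hgvx hcount
      refine ⟨st2, visA2, P2, V2, sub2, h1, h2, h3, h4, h5, ?_, ?_, h8⟩
      · intro LH hLH
        obtain ⟨LHA, hEq, hL, hpt⟩ := h6 LH hLH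
        exact ⟨LHA, by rw [dfsALoop, if_neg hvisnx]; exact hEq, hL, hpt⟩
      · rw [dfsCLoop, if_neg hvisnx]
        exact h7

lemma mloopP_of_nodeP (f : Nat) (hn : NodeP f) : MLoopP f := by
  intro g m x nexts
  induction nexts with
  | nil =>
    intro vis visFilt hg hv hall hnx hxr hvf hmono hgvx hcount
    refine ⟨0, ?_, by simp [dfsCLoop]⟩
    intro k rest acc
    simp [dfsCLoop]
  | cons nx rest ih =>
    intro vis visFilt hg hv hall hnx hxr hvf hmono hgvx hcount
    have hInR_nx : InR m nx := hnx nx List.mem_cons_self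
    have hrest : ∀ e ∈ rest, InR m e := fun e he => hnx e (List.mem_cons_of_mem _ he)
    by_cases hflt : PySem.List.pyGetD visFilt nx false = false
    · by_cases hnow : PySem.List.pyGetD vis nx false = false
      · -- still unvisited when popped: the full dfs cascade runs here
        have hgv_nx : gv vis (sl m nx) = false := by
          have h4 := pyGetD_gv vis nx (hv ▸ hInR_nx)
          rw [hv] at h4
          rw [← h4]
          exact hnow
        obtain ⟨r, visA1, P1, V1, sub1, cost1, hA1len, hA1vis, hV1x, hV1, hP1, hP1x, hcnt1,
          hA1, hC1, hS1, hB1, hcost1⟩ := hn g m nx vis hg hv hall hInR_nx hgv_nx hcount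
        have hmono1 : ∀ j, gv vis j = true → gv visA1 j = true := by
          intro j hj; rw [hA1vis j, hj]; rfl
        obtain ⟨cost2, hB2, hcost2⟩ :=
          ih visA1 visFilt hg hA1len hall hrest hxr hvf (fun j hj => hmono1 j (hmono j hj))
            (hmono1 _ hgvx) (le_trans hcnt1 hcount)
        have hCL : dfsCLoop f g x (nx :: rest) vis
            = ((dfsCLoop f g x rest visA1).1, ((nx, some x) :: sub1) ++ (dfsCLoop f g x rest visA1).2) := by
          rw [dfsCLoop, if_pos hnow, hC1 (some x)]
        refine ⟨cost1 + cost2, ?_, ?_⟩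
        · intro k rest' acc
          rw [hCL]
          simp only [List.filter_cons, hflt, Bool.not_false, if_pos, List.map_cons,
            List.cons_append]
          have e1 : cost1 + cost2 + k = cost1 + (cost2 + k) := by omega
          rw [e1, hB1 (some x) (cost2 + k)
            ((List.filter (fun nx => !PySem.List.pyGetD visFilt nx false) rest).map
              (fun nx => (nx, (some x : Option Int))) ++ rest') acc]
          rw [hB2 k rest' (acc ++ (nx, some x) :: sub1)]
          simp
        · rw [hCL]
          simp only [List.length_cons]
          omega
      · -- already visited when popped: the machine pops and skips, the loop skips too
        have hskip : PySem.List.pyGetD vis nx false = true := by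
          cases h : PySem.List.pyGetD vis nx false
          · exact absurd h hnow
          · rfl
        obtain ⟨cost2, hB2, hcost2⟩ :=
          ih vis visFilt hg hv hall hrest hxr hvf hmono hgvx hcount
        have hCL : dfsCLoop f g x (nx :: rest) vis = dfsCLoop f g x rest vis := by
          rw [dfsCLoop, if_neg hnow]
        refine ⟨cost2 + 1, ?_, ?_⟩
        · intro k rest' acc
          rw [hCL]
          simp only [List.filter_cons, hflt, Bool.not_false, if_pos, List.map_cons,
            List.cons_append]
          have e1 : cost2 + 1 + k = (cost2 + k) + 1 := by omega
          rw [e1]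
          rw [dfsB, if_pos hskip]
          exact hB2 k rest' acc
        · rw [hCL]; simp only [List.length_cons]; omega
    · -- filtered out at push time: the machine never stacked it; the loop skips it
      have hfltT : PySem.List.pyGetD visFilt nx false = true := by
        cases h : PySem.List.pyGetD visFilt nx false
        · exact absurd h hflt
        · rfl
      have hnowT : PySem.List.pyGetD vis nx false = true := by
        have h1 := pyGetD_gv visFilt nx (hvf ▸ hInR_nx)
        rw [hvf] at h1
        have h2 : gv visFilt (sl m nx) = true := by rw [← h1]; exact hfltT
        have h4 := pyGetD_gv vis nx (hv ▸ hInR_nx)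
        rw [hv] at h4
        rw [h4]
        exact hmono _ h2
      obtain ⟨cost2, hB2, hcost2⟩ :=
        ih vis visFilt hg hv hall hrest hxr hvf hmono hgvx hcount
      have hCL : dfsCLoop f g x (nx :: rest) vis = dfsCLoop f g x rest vis := by
        rw [dfsCLoop, if_neg (by rw [hnowT]; simp)]
      refine ⟨cost2, ?_, ?_⟩
      · intro k rest' acc
        rw [hCL]
        simp only [List.filter_cons, hfltT, Bool.not_true]
        exact hB2 k rest' acc
      · rw [hCL]; simp only [List.length_cons]; omega

lemma contains_false_iff (st : List Bool) : st.contains false = true ↔ 1 ≤ st.count false := by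
  rw [List.contains_iff_mem, Nat.succ_le_iff, List.count_pos_iff]

lemma nodeP_succ (f : Nat) (hl : LoopP f) (hm : MLoopP f) : NodeP (f + 1) := by
  intro g m x vis hg hv hall hxr hfresh hcount
  have hIn : InR vis.length x := hv ▸ hxr
  have hslt : sl m x < m := sl_lt hxr
  have hset : PySem.List.pySetD vis x true = vis.set (sl m x) true := by
    rw [pySetD_set vis x true hIn, hv]
  have hv1 : (vis.set (sl m x) true).length = m := by simp [hv]
  have hgv1 : ∀ j, gv (vis.set (sl m x) true) j = (gv vis j || decide (j = sl m x)) := by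
    intro j
    rw [gv, getD_set]
    by_cases hj : j = sl m x
    · subst hj; rw [if_pos ⟨rfl, hv ▸ hslt⟩, hfresh]; simp
    · rw [if_neg (by tauto)]; simp [hj]; rfl
  have hcnt1 : (vis.set (sl m x) true).count false + 1 = vis.count false :=
    count_false_set vis (sl m x) (hv ▸ hslt) hfresh
  have hgvx1 : gv (vis.set (sl m x) true) (sl m x) = true := by rw [hgv1]; simp
  have hnbrs : PySem.List.pyGetD g x [] = g.getD (sl m x) [] := by
    rw [pyGetD_getD g x [] (hg ▸ hxr), hg]
  have hnbrsIn : ∀ e ∈ g.getD (sl m x) [], InR m e := by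
    intro e he
    refine hall (g.getD (sl m x) []) ?_ e he
    rw [List.getD_eq_getElem g [] (hg ▸ hslt)]
    exact List.getElem_mem _
  have hcnt1f : (vis.set (sl m x) true).count false ≤ f := by omega
  obtain ⟨st, visA, P1, V1, sub, hAlen, hAvis, hV1, hP1, hcntA, hA, hC, hS⟩ :=
    hl g m x (g.getD (sl m x) []) (vis.set (sl m x) true) hg hv1 hall hnbrsIn hxr hgvx1 hcnt1f
  obtain ⟨costM, hBM, hcostM⟩ :=
    hm g m x (g.getD (sl m x) []) (vis.set (sl m x) true) (vis.set (sl m x) true) hg hv1 hall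
      hnbrsIn hxr hv1 (fun _ h => h) hgvx1 hcnt1f
  have hP1x : P1 (sl m x) = false := by
    by_contra hc
    have hp : P1 (sl m x) = true := by
      cases h : P1 (sl m x)
      · exact absurd h hc
      · rfl
    have := (hV1 _ (hP1 _ hp)).1
    rw [hgvx1] at this
    cases this
  refine ⟨st.contains false, visA,
    (fun j => P1 j || (decide (j = sl m x) && st.contains false)),
    (fun j => V1 j || decide (j = sl m x)), sub, 1 + costM, hAlen,
    ?_, ?_, ?_, ?_, ?_, ?_, ?_, ?_, ?_, ?_, ?_⟩
  · intro j
    rw [hAvis j, hgv1 j]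
    simp only []
    cases gv vis j <;> cases V1 j <;> cases decide (j = sl m x) <;> simp
  · simp
  · intro j hj
    simp only [] at hj
    rcases Bool.or_eq_true_iff.1 hj with h | h
    · have h1 := hV1 j h
      have h2 := hgv1 j
      rw [h1.1] at h2
      constructor
      · cases hgvj : gv vis j
        · rfl
        · rw [hgvj] at h2; simp at h2
      · exact h1.2
    · have : j = sl m x := by simpa using h
      subst this
      exact ⟨hfresh, hslt⟩
  · intro j hj
    simp only [] at hj ⊢
    rcases Bool.or_eq_true_iff.1 hj with h | h
    · simp [hP1 j h]
    · rcases Bool.and_eq_true_iff.1 h with ⟨h1, _⟩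
      simp [h1]
  · simp only [hP1x, decide_true, Bool.false_or, Bool.true_and]
  · omega
  · -- the A-side call
    intro LH hLH
    obtain ⟨LHA, hEq, hL, hpt⟩ := hA LH hLH
    simp only [dfsA, hset, hnbrs, hEq]
    by_cases hr : st.contains false = true
    · rw [if_pos ((contains_false_iff st).1 hr)]
      have hInL : InR LHA.length x := hL ▸ hxr
      refine ⟨LHA.set (sl m x) true, ?_, by simpa using hL, ?_⟩
      · rw [pySetD_set LHA x true hInL, hL, hr]
      · intro j
        rw [gv, getD_set, hr]
        by_cases hj : j = sl m x
        · subst hj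
          rw [if_pos ⟨rfl, hL ▸ hslt⟩]
          simp
        · rw [if_neg (by tauto)]
          have := hpt j
          rw [gv] at this
          rw [this]
          simp [hj]
    · have hr' : st.contains false = false := by
        cases h : st.contains false
        · rfl
        · exact absurd h hr
      rw [if_neg (by rw [← contains_false_iff]; exact hr)]
      refine ⟨LHA, by rw [hr'], hL, ?_⟩
      intro j
      rw [hpt j, hr']
      cases gv LH j <;> cases P1 j <;> simp
  · -- the C-side call
    intro p
    simp only [dfsC, hset, hnbrs, hC]
  · -- the sweep of the subtree below x
    intro on0 hlen0 hfr
    have hfr1 : ∀ j, V1 j = true → gv on0 j = false := by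
      intro j hj
      exact hfr j (by simp [hj])
    obtain ⟨hsl, hsp⟩ := hS on0 hlen0 hfr1
    refine ⟨hsl, ?_⟩
    intro j
    rw [hsp j]
    simp only []
    cases gv on0 j <;> cases P1 j <;> cases decide (j = sl m x) <;> cases st.contains false <;> simp
  · -- the machine pops x, pushes the unvisited neighbours, and runs the cascade
    intro p k rest acc
    have hcond : PySem.List.pyGetD vis x false = false := by
      have h4 := pyGetD_gv vis x hIn
      rw [hv] at h4
      rw [h4]
      exact hfresh
    have e1 : 1 + costM + k = (costM + k) + 1 := by omega
    rw [e1, dfsB, hcond]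
    simp only [Bool.false_eq_true, if_false, hset, hnbrs, push_foldl]
    rw [hBM k rest (acc ++ [(x, p)]), hC]
    simp
  · -- fuel accounting
    rw [hC] at hcostM
    have hds := ds_set g vis (sl m x) (hg ▸ hslt) hfresh (hv ▸ hslt)
    simp only [] at hcostM
    omega

lemma count_false_pos (vis : List Bool) (j : Nat) (hj : j < vis.length)
    (hv : gv vis j = false) : 1 ≤ vis.count false := by
  have hmem : false ∈ vis := by
    have : vis.getD j false = vis[j] := List.getD_eq_getElem vis false hj
    rw [gv, this] at hv
    exact hv ▸ List.getElem_mem hj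
  simpa [Nat.succ_le_iff, List.count_pos_iff] using hmem

lemma nodeP_zero : NodeP 0 := by
  intro g m x vis hg hv _ hx hfresh hcount
  exact absurd hcount (by
    have hlt : sl m x < vis.length := by rw [hv]; exact sl_lt hx
    have := count_false_pos vis (sl m x) hlt hfresh
    omega)

lemma nodeP_all (f : Nat) : NodeP f := by
  induction f with
  | zero => exact nodeP_zero
  | succ f ih => exact nodeP_succ f (loopP_of_nodeP f ih) (mloopP_of_nodeP f ih)

-- one append 'graph[x].append(v)': length, in-range adjacency, total mass + 1
lemma app_step (m : Nat) (g : List (List Int)) (x v : Int) (hx : InR m x) (hv : InR m v)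
    (hlen : g.length = m) (hall : AllInR m g) :
    (PySem.List.pySetD g x (PySem.List.pyGetD g x [] ++ [v])).length = m ∧
    AllInR m (PySem.List.pySetD g x (PySem.List.pyGetD g x [] ++ [v])) ∧
    (∑ j ∈ Finset.range m, ((PySem.List.pySetD g x (PySem.List.pyGetD g x [] ++ [v])).getD j []).length)
      = (∑ j ∈ Finset.range m, (g.getD j []).length) + 1 := by
  have hx' : InR g.length x := hlen ▸ hx
  have hslt : sl m x < m := sl_lt hx
  rw [pySetD_set g x _ hx', pyGetD_getD g x [] hx', hlen]
  refine ⟨by simpa using hlen, ?_, ?_⟩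
  · intro row hrow e he
    rcases List.mem_or_eq_of_mem_set hrow with h | h
    · exact hall row h e he
    · subst h
      rcases List.mem_append.1 he with h | h
      · exact hall _ (by
          have : g.getD (sl m x) [] = g[sl m x] := List.getD_eq_getElem g [] (hlen ▸ hslt)
          rw [this]
          exact List.getElem_mem _) e h
      · simp at h; subst h; exact hv
  · rw [← Finset.sum_erase_add _ _ (Finset.mem_range.2 hslt),
        ← Finset.sum_erase_add _ _ (Finset.mem_range.2 hslt)]
    have he : ∀ j ∈ (Finset.range m).erase (sl m x),
        ((g.set (sl m x) (g.getD (sl m x) [] ++ [v])).getD j []).length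
          = (g.getD j []).length := by
      intro j hj
      rw [getD_set, if_neg (by
        have := (Finset.mem_erase.1 hj).1
        tauto)]
    rw [Finset.sum_congr rfl he, getD_set, if_pos ⟨rfl, hlen ▸ hslt⟩]
    simp
    omega

-- graph building: length, in-range adjacency, total adjacency mass = 2 * #edges
lemma build_inv (m : Nat) (lh : List (List Int)) (g0 : List (List Int))
    (hpre : ∀ p ∈ lh, p.length = 2 ∧ ∀ e ∈ p, InR m e)
    (hlen : g0.length = m) (hall : AllInR m g0) :
    let g := lh.foldl (fun g p =>
      match p with
      | s :: e :: _ =>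
        let g1 := PySem.List.pySetD g s (PySem.List.pyGetD g s [] ++ [e])
        PySem.List.pySetD g1 e (PySem.List.pyGetD g1 e [] ++ [s])
      | _ => g) g0
    g.length = m ∧ AllInR m g ∧
      (∑ j ∈ Finset.range m, (g.getD j []).length)
        = (∑ j ∈ Finset.range m, (g0.getD j []).length) + 2 * lh.length := by
  induction lh generalizing g0 with
  | nil => exact ⟨hlen, hall, by simp⟩
  | cons p t ih =>
    obtain ⟨hp2, hpin⟩ := hpre p (List.mem_cons_self)
    obtain ⟨a, b, hab⟩ : ∃ a b, p = [a, b] := by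
      match p, hp2 with
      | [a, b], _ => exact ⟨a, b, rfl⟩
    subst hab
    have ha : InR m a := hpin a (by simp)
    have hb : InR m b := hpin b (by simp)
    obtain ⟨h1l, h1a, h1s⟩ := app_step m g0 a b ha hb hlen hall
    obtain ⟨h2l, h2a, h2s⟩ := app_step m _ b a hb ha h1l h1a
    have := ih _ (fun q hq => hpre q (List.mem_cons_of_mem _ hq)) h2l h2a
    simp only [List.foldl_cons] at *
    refine ⟨this.1, this.2.1, ?_⟩
    rw [this.2.2, h2s, h1s]
    simp [List.length_cons]
    ring

lemma gv_replicate (m j : Nat) : gv (List.replicate m false) j = false := by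
  simp only [gv, List.getD_eq_getElem?_getD, List.getElem?_replicate]
  split <;> rfl

lemma getD_map_nil (l : List Int) (j : Nat) :
    ((l.map (fun _ => ([] : List Int))).getD j []) = [] := by
  simp only [List.getD_eq_getElem?_getD, List.getElem?_map]
  cases l[j]? <;> rfl

-- ===== VERDICT (by name: the statement is the Claim_ definition above) =====
theorem solution_spec : Claim_equal_solution := by
  unfold Claim_equal_solution
  intro n lighthouse _ hpre
  obtain ⟨hn0, hne, hedges⟩ := hpre
  unfold Spec_solution
  obtain ⟨p0, lt, rfl⟩ : ∃ p0 lt, lighthouse = p0 :: lt := by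
    cases lighthouse with
    | nil => exact absurd rfl hne
    | cons a b => exact ⟨a, b, rfl⟩
  obtain ⟨hp0len, hp0e⟩ := hedges p0 List.mem_cons_self
  obtain ⟨a, b, rfl⟩ : ∃ a b, p0 = [a, b] := by
    match p0, hp0len with
    | [a, b], _ => exact ⟨a, b, rfl⟩
  have hcast : (((n + 1).toNat : Int)) = n + 1 := Int.toNat_of_nonneg (by omega)
  set m := (n + 1).toNat with hm
  have hmpos : 1 ≤ m := by omega
  set g0 := (PySem.List.pyRange 0 (n + 1) 1).map (fun _ => ([] : List Int)) with hg0
  have hg0len : g0.length = m := by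
    rw [hg0, List.length_map, PySem.List.length_pyRange_one]
    omega
  have hg0all : AllInR m g0 := by
    intro row hrow e he
    rcases List.mem_map.1 hrow with ⟨_, _, hr⟩
    rw [← hr] at he
    cases he
  have hg0sum : (∑ j ∈ Finset.range m, (g0.getD j []).length) = 0 := by
    apply Finset.sum_eq_zero
    intro j _
    rw [hg0, getD_map_nil]
    rfl
  have hpre' : ∀ p ∈ [a, b] :: lt, p.length = 2 ∧ ∀ e ∈ p, InR m e := by
    intro p hp
    obtain ⟨h1, h2⟩ := hedges p hp
    refine ⟨h1, fun e he => ?_⟩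
    obtain ⟨h3, h4⟩ := h2 e he
    exact ⟨by omega, by omega⟩
  obtain ⟨hglen, hgall, hgsum⟩ := build_inv m ([a, b] :: lt) g0 hpre' hg0len hg0all
  set graph := ([a, b] :: lt).foldl (fun g p =>
    match p with
    | s :: e :: _ =>
      let g1 := PySem.List.pySetD g s (PySem.List.pyGetD g s [] ++ [e])
      PySem.List.pySetD g1 e (PySem.List.pyGetD g1 e [] ++ [s])
    | _ => g) g0 with hgraph
  have hrootIn : InR m a := by
    obtain ⟨h3, h4⟩ := hp0e a (by simp)
    exact ⟨by omega, by omega⟩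
  have hvis0len : (List.replicate m false).length = m := by simp
  have hvis0cnt : (List.replicate m false).count false ≤ m + 1 := by simp
  obtain ⟨r, visA, P, V, sub, cost, hAlen, hAvis, hVx, hV, hP, hPx, hcntA, hA, hCc, hS, hB, hcost⟩ :=
    nodeP_all (m + 1) graph m a (List.replicate m false) hglen hvis0len hgall hrootIn
      (gv_replicate m _) hvis0cnt
  obtain ⟨LHA, hEqA, hLA, hptA⟩ := hA (List.replicate m false) (by simp)
  -- the B-side machine run
  have hds0 : ds graph (List.replicate m false) = 2 * ([a, b] :: lt).length := by
    unfold ds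
    rw [hglen]
    calc (∑ j ∈ Finset.range m, if gv (List.replicate m false) j then 0 else (graph.getD j []).length)
        = ∑ j ∈ Finset.range m, (graph.getD j []).length := by
          apply Finset.sum_congr rfl
          intro j _
          rw [gv_replicate]
          rfl
      _ = 2 * ([a, b] :: lt).length := by rw [hgsum, hg0sum]; omega
  have hcostle : cost ≤ 2 * ([a, b] :: lt).length + 1 := by
    rw [hds0] at hcost
    omega
  have hfuel : cost + (2 * ([a, b] :: lt).length + 1 - cost) = 2 * ([a, b] :: lt).length + 1 := by
    omega
  have hkey := hB none (2 * ([a, b] :: lt).length + 1 - cost) [] []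
  rw [hfuel] at hkey
  rw [dfsB_nil] at hkey
  -- the sweep
  have hfresh0 : ∀ j, V j = true → gv (List.replicate m false) j = false := fun j _ => gv_replicate m j
  obtain ⟨hslen, hsp⟩ := hS (List.replicate m false) (by simp) hfresh0
  have hLHeq : LHA = sweepB sub (List.replicate m false) := by
    apply eq_of_gv _ _ (by rw [hLA, hslen])
    intro j
    rw [hptA j, hsp j, gv_replicate]
  -- assemble both sides
  have halt : ∀ (lh : List (List Int)) (g : List (List Int)),
      lh.foldl (fun g p =>
        match p with
        | [] => g
        | _ :: [] => g
        | s :: e :: _ =>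
          let g1 := PySem.List.pySetD g s (PySem.List.pyGetD g s [] ++ [e])
          PySem.List.pySetD g1 e (PySem.List.pyGetD g1 e [] ++ [s])) g
      = lh.foldl (fun g p =>
        match p with
        | s :: e :: _ =>
          let g1 := PySem.List.pySetD g s (PySem.List.pyGetD g s [] ++ [e])
          PySem.List.pySetD g1 e (PySem.List.pyGetD g1 e [] ++ [s])
        | _ => g) g := by
    intro lh
    induction lh with
    | nil => intro g; rfl
    | cons p t ih =>
      intro g
      rw [List.foldl_cons, List.foldl_cons, ih]
      congr 1
      match p with
      | [] => rfl
      | [_] => rfl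
      | _ :: _ :: _ => rfl
  show solution n (([a, b]) :: lt) = solution_alt n (([a, b]) :: lt)
  unfold solution solution_alt
  simp only [← hm, ← hg0, halt, ← hgraph, PySem.List.pyGetD_zero_cons]
  rw [hEqA, hkey]
  show ((LHA.count true : Int))
    = ((sweepB ([((a : Int), (none : Option Int))] ++ sub) (List.replicate m false)).count true : Int)
  have hstep : sweepB [((a : Int), (none : Option Int))] (sweepB sub (List.replicate m false))
      = sweepB sub (List.replicate m false) := rfl
  rw [sweepB_append, hstep, ← hLHeq]
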